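-- pv_equiv track=rewrite | github.com/aminfardi/Quotable-Ai | tapas/tapas/utils/tf_example_utils.py | _get_all_answer_ids_from_coordinates
-- ===== SOURCE A (Python) =====
-- def _get_cell_token_indexes(column_ids, row_ids,
--                             column_id, row_id):
--   for index in range(len(column_ids)):
--     if (column_ids[index] - 1 == column_id and row_ids[index] - 1 == row_id):
--       yield index
--
-- def _get_all_answer_ids_from_coordinates(
--     column_ids,
--     row_ids,
--     answers_list,
-- ):
--   """Maps lists of answer coordinates to token indexes."""
--   answer_ids = [0] * len(column_ids)
--   found_answers = set()
--   all_answers = set()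
--   for answers in answers_list:
--     for column_index, row_index in answers:
--       all_answers.add((column_index, row_index))
--       for index in _get_cell_token_indexes(column_ids, row_ids, column_index,
--                                            row_index):
--         found_answers.add((column_index, row_index))
--         answer_ids[index] = 1
--
--   missing_count = len(all_answers) - len(found_answers)
--   return answer_ids, missing_count
-- ===== SOURCE B (Python) =====
-- def _get_all_answer_ids_from_coordinates(
--     column_ids,
--     row_ids,
--     answers_list,
-- ):
--   """Maps lists of answer coordinates to token indexes.
--
--   Inverted traversal: collect all answer coordinates into one set, then a
--   single pass over the tokens marks each token whose cell is an answer
--   coordinate and records which coordinates were found.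
--   """
--   all_answers = set()
--   for answers in answers_list:
--     all_answers.update(answers)
--
--   answer_ids = [0] * len(column_ids)
--   found_answers = set()
--   for index, (column_id, row_id) in enumerate(zip(column_ids, row_ids)):
--     cell = (column_id - 1, row_id - 1)
--     if cell in all_answers:
--       found_answers.add(cell)
--       answer_ids[index] = 1
--
--   return answer_ids, len(all_answers) - len(found_answers)
-- ===== Notes on version B (the rewrite author's own statement) =====
-- stated objective: faster
-- what changed: Inverts the traversal: instead of scanning all tokens once per answer coordinate, B collects every answer coordinate into one set and then makes a single pass over the tokens, marking each token whose cell is in the set and recording the coordinates actually found.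
import Mathlib
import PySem

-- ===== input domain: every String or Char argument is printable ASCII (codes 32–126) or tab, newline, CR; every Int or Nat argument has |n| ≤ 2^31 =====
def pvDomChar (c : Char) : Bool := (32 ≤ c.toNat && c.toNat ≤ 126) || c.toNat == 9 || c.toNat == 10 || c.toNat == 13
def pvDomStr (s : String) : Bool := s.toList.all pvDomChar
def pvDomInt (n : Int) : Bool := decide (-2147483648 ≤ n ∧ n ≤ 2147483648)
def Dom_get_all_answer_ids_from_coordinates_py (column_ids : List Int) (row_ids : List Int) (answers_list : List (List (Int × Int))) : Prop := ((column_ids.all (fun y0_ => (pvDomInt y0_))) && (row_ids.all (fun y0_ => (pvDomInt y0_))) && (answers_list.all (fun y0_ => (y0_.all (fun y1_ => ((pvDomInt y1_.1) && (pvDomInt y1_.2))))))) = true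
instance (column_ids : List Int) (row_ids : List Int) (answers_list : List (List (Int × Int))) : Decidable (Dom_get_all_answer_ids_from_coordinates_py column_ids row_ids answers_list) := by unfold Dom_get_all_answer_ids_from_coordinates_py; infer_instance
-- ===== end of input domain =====

-- B inverts A's traversal: one set of all answer coordinates, then a single pass over the tokens (asymptotically faster).

-- ===== PORT A =====
-- port of the generator _get_cell_token_indexes: the list of yielded indexes
-- (pyGetD is exact here: under Pre_ every index actually read by the Python is in range)
def pvCellTokenIndexes (column_ids : List Int) (row_ids : List Int) (column_id : Int) (row_id : Int) : List Int :=
  (PySem.List.pyRange 0 (column_ids.length) 1).filter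
    (fun i => PySem.List.pyGetD column_ids i 0 - 1 == column_id &&
              PySem.List.pyGetD row_ids i 0 - 1 == row_id)

def get_all_answer_ids_from_coordinates_py (column_ids : List Int) (row_ids : List Int) (answers_list : List (List (Int × Int))) : List Int × Int :=
  -- state: (answer_ids, found_answers, all_answers)
  let st := answers_list.foldl (fun st answers =>
      answers.foldl (fun st cr =>
        let all := PySem.Set.add st.2.2 cr
        let p := (pvCellTokenIndexes column_ids row_ids cr.1 cr.2).foldl
            (fun p i => (PySem.List.pySetD p.1 i 1, PySem.Set.add p.2 cr)) (st.1, st.2.1)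
        (p.1, p.2, all)) st)
    (List.replicate column_ids.length (0 : Int),
     (PySem.Set.empty : PySem.Set (Int × Int)), (PySem.Set.empty : PySem.Set (Int × Int)))
  (st.1, (PySem.Set.len st.2.2 : Int) - PySem.Set.len st.2.1)

-- ===== PORT B =====
def get_all_answer_ids_from_coordinates_py_alt (column_ids : List Int) (row_ids : List Int) (answers_list : List (List (Int × Int))) : List Int × Int :=
  -- all_answers: one set.update per answers list
  let all_answers := answers_list.foldl (fun s answers => PySem.Set.update s answers)
      (PySem.Set.empty : PySem.Set (Int × Int))
  -- single pass over enumerate(zip(column_ids, row_ids)); state: (answer_ids, found_answers)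
  let st := (PySem.List.enumerate (column_ids.zip row_ids) 0).foldl
      (fun st p =>
        let cell := (p.2.1 - 1, p.2.2 - 1)
        if PySem.Set.contains all_answers cell then
          (PySem.List.pySetD st.1 p.1 1, PySem.Set.add st.2 cell)
        else st)
      (List.replicate column_ids.length (0 : Int), (PySem.Set.empty : PySem.Set (Int × Int)))
  (st.1, (PySem.Set.len all_answers : Int) - PySem.Set.len st.2)

-- ===== PRECONDITION & SPEC =====
-- Pre_ excludes exactly the inputs where A raises IndexError: some answer coordinate's column
-- matches a token index at or beyond len(row_ids) (possible only when row_ids is shorter than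
-- column_ids), so the short-circuited row_ids[index] access is reached out of range.
def Pre_get_all_answer_ids_from_coordinates_py (column_ids : List Int) (row_ids : List Int) (answers_list : List (List (Int × Int))) : Prop :=
  ∀ a ∈ answers_list, ∀ cr ∈ a, ∀ i : Nat, i < column_ids.length → row_ids.length ≤ i →
    column_ids.getD i 0 - 1 ≠ cr.1
instance (column_ids : List Int) (row_ids : List Int) (answers_list : List (List (Int × Int))) : Decidable (Pre_get_all_answer_ids_from_coordinates_py column_ids row_ids answers_list) := by unfold Pre_get_all_answer_ids_from_coordinates_py; infer_instance

def pvWitness_get_all_answer_ids_from_coordinates_py : List Int × List Int × (List (List (Int × Int))) :=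
  ([1, 2], [1, 1], [[(0, 0)], [(1, 0), (5, 5)]])

def Spec_get_all_answer_ids_from_coordinates_py (column_ids : List Int) (row_ids : List Int) (answers_list : List (List (Int × Int))) (out : List Int × Int) : Prop := out = get_all_answer_ids_from_coordinates_py_alt column_ids row_ids answers_list
instance (column_ids : List Int) (row_ids : List Int) (answers_list : List (List (Int × Int))) (out : List Int × Int) : Decidable (Spec_get_all_answer_ids_from_coordinates_py column_ids row_ids answers_list out) := by unfold Spec_get_all_answer_ids_from_coordinates_py; infer_instance

-- ===== CLAIM (what is proved, stated in full; the proofs are below) =====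
def Claim_equal_get_all_answer_ids_from_coordinates_py : Prop := ∀ (column_ids : List Int) (row_ids : List Int) (answers_list : List (List (Int × Int))), Dom_get_all_answer_ids_from_coordinates_py column_ids row_ids answers_list → Pre_get_all_answer_ids_from_coordinates_py column_ids row_ids answers_list → Spec_get_all_answer_ids_from_coordinates_py column_ids row_ids answers_list (get_all_answer_ids_from_coordinates_py column_ids row_ids answers_list)

-- ===== LEMMAS AND PROOFS =====

-- pyGetD at a nonnegative index is List.getD
theorem pvPyGetD_nonneg {α : Type} (xs : List α) (j : Int) (d : α) (h : 0 ≤ j) :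
    PySem.List.pyGetD xs j d = xs.getD j.toNat d := by
  lift j to ℕ using h
  simp [pysem]

-- membership in A's generator output, at a Nat index
theorem pvMemIdxs (cids rids : List Int) (c r : Int) (k : Nat) :
    ((k : Int) ∈ pvCellTokenIndexes cids rids c r) ↔
      k < cids.length ∧ cids.getD k 0 - 1 = c ∧ rids.getD k 0 - 1 = r := by
  unfold pvCellTokenIndexes
  rw [List.mem_filter, PySem.List.mem_pyRange_one,
      pvPyGetD_nonneg _ _ _ (Int.natCast_nonneg k), pvPyGetD_nonneg _ _ _ (Int.natCast_nonneg k)]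
  simp only [Int.toNat_natCast, Bool.and_eq_true, beq_iff_eq]
  constructor
  · rintro ⟨⟨-, h2⟩, h3, h4⟩
    exact ⟨by exact_mod_cast h2, h3, h4⟩
  · rintro ⟨h2, h3, h4⟩
    exact ⟨⟨Int.natCast_nonneg k, by exact_mod_cast h2⟩, h3, h4⟩

-- every member of the generator output is nonnegative
theorem pvIdxsNonneg (cids rids : List Int) (c r : Int) (j : Int)
    (h : j ∈ pvCellTokenIndexes cids rids c r) : 0 ≤ j := by
  unfold pvCellTokenIndexes at h
  rw [List.mem_filter, PySem.List.mem_pyRange_one] at h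
  exact h.1.1

-- A's interleaved (set index, add coordinate) fold splits into its two components
theorem pvPairFold (M : List Int) (x : Int × Int) (a : List Int) (s : PySem.Set (Int × Int)) :
    M.foldl (fun p i => (PySem.List.pySetD p.1 i 1, PySem.Set.add p.2 x)) (a, s) =
      (M.foldl (fun a i => PySem.List.pySetD a i 1) a,
       if M.isEmpty then s else PySem.Set.add s x) := by
  induction M generalizing a s with
  | nil => rfl
  | cons i M ih =>
      simp only [List.foldl_cons, ih, List.isEmpty_cons]
      cases hM : M.isEmpty
      · simp
      · simp

-- A's coordinate loop splits into its three independent components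
theorem pvProjA (cids rids : List Int) (L : List (Int × Int))
    (st : List Int × PySem.Set (Int × Int) × PySem.Set (Int × Int)) :
    L.foldl (fun st cr =>
        (((pvCellTokenIndexes cids rids cr.1 cr.2).foldl
            (fun p i => (PySem.List.pySetD p.1 i 1, PySem.Set.add p.2 cr)) (st.1, st.2.1)).1,
         ((pvCellTokenIndexes cids rids cr.1 cr.2).foldl
            (fun p i => (PySem.List.pySetD p.1 i 1, PySem.Set.add p.2 cr)) (st.1, st.2.1)).2,
         PySem.Set.add st.2.2 cr)) st =
      (L.foldl (fun a cr => (pvCellTokenIndexes cids rids cr.1 cr.2).foldl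
          (fun a i => PySem.List.pySetD a i 1) a) st.1,
       L.foldl (fun f cr => if (pvCellTokenIndexes cids rids cr.1 cr.2).isEmpty then f
          else PySem.Set.add f cr) st.2.1,
       PySem.Set.update st.2.2 L) := by
  induction L generalizing st with
  | nil => simp [PySem.Set.update_nil]
  | cons cr L ih =>
      rw [List.foldl_cons, ih, pvPairFold, PySem.Set.update_cons]
      simp only [List.foldl_cons]

-- B's token loop splits into its two independent components
theorem pvProjB (E : List (Int × Int × Int)) (all : PySem.Set (Int × Int))
    (st : List Int × PySem.Set (Int × Int)) :
    E.foldl (fun st p =>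
        if PySem.Set.contains all (p.2.1 - 1, p.2.2 - 1) then
          (PySem.List.pySetD st.1 p.1 1, PySem.Set.add st.2 (p.2.1 - 1, p.2.2 - 1))
        else st) st =
      (E.foldl (fun a p => if PySem.Set.contains all (p.2.1 - 1, p.2.2 - 1) then
          PySem.List.pySetD a p.1 1 else a) st.1,
       E.foldl (fun f p => if PySem.Set.contains all (p.2.1 - 1, p.2.2 - 1) then
          PySem.Set.add f (p.2.1 - 1, p.2.2 - 1) else f) st.2) := by
  induction E generalizing st with
  | nil => rfl
  | cons p E ih =>
      simp only [List.foldl_cons]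
      by_cases hc : PySem.Set.contains all (p.2.1 - 1, p.2.2 - 1) = true
      · rw [if_pos hc, if_pos hc, if_pos hc, ih]
      · rw [if_neg hc, if_neg hc, if_neg hc, ih]

-- B's per-list set.update loop is one update by the flattened coordinate list
theorem pvAllEq (al : List (List (Int × Int))) (s : PySem.Set (Int × Int)) :
    al.foldl (fun s a => PySem.Set.update s a) s = PySem.Set.update s al.flatten := by
  induction al generalizing s with
  | nil => simp [PySem.Set.update_nil]
  | cons a al ih =>
      rw [List.foldl_cons, List.flatten_cons, PySem.Set.update_append, ih]

-- setting a list of indexes to 1 preserves the length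
theorem pvSetOnesLen (M : List Int) (a : List Int) :
    (M.foldl (fun a i => PySem.List.pySetD a i 1) a).length = a.length := by
  induction M generalizing a with
  | nil => rfl
  | cons i M ih => rw [List.foldl_cons, ih, PySem.List.length_pySetD]

-- setting a list of in-range indexes to 1: pointwise value
theorem pvSetOnesGet (M : List Int) (a : List Int) (j : Nat)
    (hM : ∀ i ∈ M, 0 ≤ i ∧ i < (a.length : Int)) :
    (M.foldl (fun a i => PySem.List.pySetD a i 1) a)[j]? =
      if (j : Int) ∈ M then some 1 else a[j]? := by
  induction M generalizing a with
  | nil => simp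
  | cons i M ih =>
      have hi := hM i (by simp)
      have hset : PySem.List.pySetD a i 1 = a.set i.toNat 1 :=
        PySem.List.pySetD_of_nonneg a 1 hi.1
      have hlen : (a.set i.toNat 1).length = a.length := by simp
      rw [List.foldl_cons, hset,
          ih _ (fun i' h' => by rw [hlen]; exact hM i' (List.mem_cons_of_mem _ h'))]
      by_cases hjM : (j : Int) ∈ M
      · rw [if_pos hjM, if_pos (List.mem_cons_of_mem _ hjM)]
      · rw [if_neg hjM, List.getElem?_set]
        by_cases hij : i.toNat = j
        · have hij' : i = (j : Int) := by omega
          rw [if_pos hij, if_pos (by omega : i.toNat < a.length),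
              if_pos (List.mem_cons.mpr (Or.inl hij'.symm))]
        · have hnm : (j : Int) ∉ i :: M := by
            intro hc
            rcases List.mem_cons.mp hc with h1 | h2
            · exact hij (by omega)
            · exact hjM h2
          rw [if_neg hij, if_neg hnm]

-- the ids component of A's loop, pointwise
theorem pvIdsAGet (cids rids : List Int) (L : List (Int × Int)) (a : List Int) (j : Nat)
    (ha : a.length = cids.length) :
    (L.foldl (fun a cr => (pvCellTokenIndexes cids rids cr.1 cr.2).foldl
        (fun a i => PySem.List.pySetD a i 1) a) a)[j]? =
      if ∃ cr ∈ L, (j : Int) ∈ pvCellTokenIndexes cids rids cr.1 cr.2 then some 1 else a[j]? := by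
  induction L generalizing a with
  | nil => simp
  | cons cr L ih =>
      have hbound : ∀ i ∈ pvCellTokenIndexes cids rids cr.1 cr.2, 0 ≤ i ∧ i < (a.length : Int) := by
        intro i hi
        have h0 := pvIdxsNonneg _ _ _ _ _ hi
        refine ⟨h0, ?_⟩
        have hk : i.toNat < cids.length :=
          ((pvMemIdxs cids rids cr.1 cr.2 i.toNat).mp
            (by rwa [Int.toNat_of_nonneg h0])).1
        omega
      rw [List.foldl_cons, ih _ (by rw [pvSetOnesLen]; exact ha)]
      by_cases hL : ∃ cr' ∈ L, (j : Int) ∈ pvCellTokenIndexes cids rids cr'.1 cr'.2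
      · obtain ⟨cr', h1, h2⟩ := hL
        rw [if_pos ⟨cr', h1, h2⟩, if_pos ⟨cr', List.mem_cons_of_mem _ h1, h2⟩]
      · rw [if_neg hL, pvSetOnesGet _ _ _ hbound]
        by_cases hcr : (j : Int) ∈ pvCellTokenIndexes cids rids cr.1 cr.2
        · rw [if_pos hcr, if_pos ⟨cr, List.mem_cons_self, hcr⟩]
        · have hnm : ¬ ∃ cr' ∈ cr :: L, (j : Int) ∈ pvCellTokenIndexes cids rids cr'.1 cr'.2 := by
            rintro ⟨cr', hm, hj⟩
            rcases List.mem_cons.mp hm with rfl | hm'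
            · exact hcr hj
            · exact hL ⟨cr', hm', hj⟩
          rw [if_neg hcr, if_neg hnm]

-- the ids component of B's loop preserves the length
theorem pvIdsBLen (zs : List (Int × Int)) (all : PySem.Set (Int × Int)) (m : Nat) (a : List Int) :
    ((List.range m).foldl (fun (st : List Int) (k : Nat) =>
        if PySem.Set.contains all ((PySem.List.pyGetD zs (k : Int) (0, 0)).1 - 1,
            (PySem.List.pyGetD zs (k : Int) (0, 0)).2 - 1) then
          PySem.List.pySetD st (k : Int) 1 else st) a).length = a.length := by
  induction m with
  | zero => rfl
  | succ m ih =>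
      rw [List.range_succ, List.foldl_append, List.foldl_cons, List.foldl_nil]
      split
      · rw [PySem.List.length_pySetD, ih]
      · exact ih

-- the ids component of B's loop, pointwise
theorem pvIdsBGet (zs : List (Int × Int)) (all : PySem.Set (Int × Int)) (m : Nat) (a : List Int)
    (j : Nat) (hm : m ≤ zs.length) (hlen : zs.length ≤ a.length) :
    ((List.range m).foldl (fun (st : List Int) (k : Nat) =>
        if PySem.Set.contains all ((PySem.List.pyGetD zs (k : Int) (0, 0)).1 - 1,
            (PySem.List.pyGetD zs (k : Int) (0, 0)).2 - 1) then
          PySem.List.pySetD st (k : Int) 1 else st) a)[j]? =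
      if j < m ∧ PySem.Set.contains all
          ((zs.getD j (0, 0)).1 - 1, (zs.getD j (0, 0)).2 - 1) = true then some 1 else a[j]? := by
  induction m with
  | zero => simp
  | succ m ih =>
      have hm' : m ≤ zs.length := Nat.le_of_succ_le hm
      rw [List.range_succ, List.foldl_append, List.foldl_cons, List.foldl_nil]
      have hih := ih hm'
      by_cases hc : PySem.Set.contains all ((PySem.List.pyGetD zs (m : Int) (0, 0)).1 - 1,
          (PySem.List.pyGetD zs (m : Int) (0, 0)).2 - 1) = true
      · have hcm : PySem.Set.contains all
            ((zs.getD m (0, 0)).1 - 1, (zs.getD m (0, 0)).2 - 1) = true := by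
          simpa [PySem.List.pyGetD_natCast] using hc
        rw [if_pos hc, PySem.List.pySetD_natCast, List.getElem?_set]
        by_cases hjm : m = j
        · subst hjm
          rw [if_pos rfl, if_pos (by rw [pvIdsBLen]; omega), if_pos ⟨Nat.lt_succ_self m, hcm⟩]
        · rw [if_neg hjm, hih]
          by_cases hC : PySem.Set.contains all
              ((zs.getD j (0, 0)).1 - 1, (zs.getD j (0, 0)).2 - 1) = true
          · by_cases hjlt : j < m
            · rw [if_pos ⟨hjlt, hC⟩, if_pos ⟨by omega, hC⟩]
            · rw [if_neg (fun h => hjlt h.1), if_neg (fun h => hjlt (by omega))]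
          · rw [if_neg (fun h => hC h.2), if_neg (fun h => hC h.2)]
      · have hcm : ¬ PySem.Set.contains all
            ((zs.getD m (0, 0)).1 - 1, (zs.getD m (0, 0)).2 - 1) = true := by
          simpa [PySem.List.pyGetD_natCast] using hc
        rw [if_neg hc, hih]
        by_cases hC : PySem.Set.contains all
            ((zs.getD j (0, 0)).1 - 1, (zs.getD j (0, 0)).2 - 1) = true
        · by_cases hjlt : j < m
          · rw [if_pos ⟨hjlt, hC⟩, if_pos ⟨by omega, hC⟩]
          · have hneg : ¬ (j < m + 1 ∧ PySem.Set.contains all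
                ((zs.getD j (0, 0)).1 - 1, (zs.getD j (0, 0)).2 - 1) = true) := by
              rintro ⟨h1, h2⟩
              have : j = m := by omega
              subst this
              exact hcm h2
            rw [if_neg (fun h => hjlt h.1), if_neg hneg]
        · rw [if_neg (fun h => hC h.2), if_neg (fun h => hC h.2)]

-- B's token loop over enumerate(zip(...)) as a loop over range(len(zip(...)))
theorem pvIdsB_enum (zs : List (Int × Int)) (all : PySem.Set (Int × Int)) (a : List Int) :
    (PySem.List.enumerate zs 0).foldl (fun st p =>
        if PySem.Set.contains all (p.2.1 - 1, p.2.2 - 1) then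
          PySem.List.pySetD st p.1 1 else st) a =
      (List.range zs.length).foldl (fun (st : List Int) (k : Nat) =>
        if PySem.Set.contains all ((PySem.List.pyGetD zs (k : Int) (0, 0)).1 - 1,
            (PySem.List.pyGetD zs (k : Int) (0, 0)).2 - 1) then
          PySem.List.pySetD st (k : Int) 1 else st) a := by
  rw [PySem.List.enumerate_eq_map_pyRange zs (0, 0), List.foldl_map, PySem.List.len_eq,
      PySem.List.pyRange_zero_natCast, List.foldl_map]

-- members of a conditional-add fold over a set
theorem pvMemFoldAdd {α : Type} (L : List α) (c : α → Bool) (h : α → Int × Int)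
    (f : PySem.Set (Int × Int)) (x : Int × Int) :
    (x ∈ L.foldl (fun f y => if c y then PySem.Set.add f (h y) else f) f) ↔
      x ∈ f ∨ ∃ y ∈ L, c y = true ∧ h y = x := by
  induction L generalizing f with
  | nil => simp
  | cons y L ih =>
      rw [List.foldl_cons]
      by_cases hc : c y = true
      · rw [if_pos hc, ih, PySem.Set.mem_add]
        constructor
        · rintro ((hf | hxy) | ⟨y', hy', hcy', hxy'⟩)
          · exact Or.inl hf
          · exact Or.inr ⟨y, List.mem_cons_self, hc, hxy.symm⟩
          · exact Or.inr ⟨y', List.mem_cons_of_mem _ hy', hcy', hxy'⟩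
        · rintro (hf | ⟨y', hy', hcy', hxy'⟩)
          · exact Or.inl (Or.inl hf)
          · rcases List.mem_cons.mp hy' with rfl | hy''
            · exact Or.inl (Or.inr hxy'.symm)
            · exact Or.inr ⟨y', hy'', hcy', hxy'⟩
      · rw [if_neg hc, ih]
        constructor
        · rintro (hf | ⟨y', hy', hcy', hxy'⟩)
          · exact Or.inl hf
          · exact Or.inr ⟨y', List.mem_cons_of_mem _ hy', hcy', hxy'⟩
        · rintro (hf | ⟨y', hy', hcy', hxy'⟩)
          · exact Or.inl hf
          · rcases List.mem_cons.mp hy' with rfl | hy''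
            · exact absurd hcy' hc
            · exact Or.inr ⟨y', hy'', hcy', hxy'⟩

-- a conditional-add fold preserves Nodup
theorem pvNodupFoldAdd {α : Type} (L : List α) (c : α → Bool) (h : α → Int × Int)
    (f : PySem.Set (Int × Int)) (hf : f.Nodup) :
    (L.foldl (fun f y => if c y then PySem.Set.add f (h y) else f) f).Nodup := by
  induction L generalizing f with
  | nil => exact hf
  | cons y L ih =>
      rw [List.foldl_cons]
      by_cases hc : c y = true
      · rw [if_pos hc]
        exact ih _ (PySem.Set.nodup_add _ _ hf)
      · rw [if_neg hc]
        exact ih _ hf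

-- an in-range element of a zip
theorem pvZipGetD (xs ys : List Int) (n : Nat) (h : n < (xs.zip ys).length) :
    (xs.zip ys).getD n (0, 0) = (xs.getD n 0, ys.getD n 0) := by
  have h' := h
  rw [List.length_zip] at h'
  rw [List.getD_eq_getElem _ _ h, List.getElem_zip,
      List.getD_eq_getElem _ _ (by omega), List.getD_eq_getElem _ _ (by omega)]

-- under Pre_, a token index matching an answer coordinate lies inside the zip
theorem pvMatchLt (cids rids : List Int) (coords : List (Int × Int))
    (Hpre : ∀ cr ∈ coords, ∀ i : Nat, i < cids.length → rids.length ≤ i →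
      cids.getD i 0 - 1 ≠ cr.1)
    (x : Int × Int) (k : Nat) (hx : x ∈ coords)
    (hk : (k : Int) ∈ pvCellTokenIndexes cids rids x.1 x.2) :
    k < (cids.zip rids).length := by
  have h := (pvMemIdxs cids rids x.1 x.2 k).mp hk
  rw [List.length_zip]
  by_contra hlt
  have hr : rids.length ≤ k := by omega
  exact Hpre x hx k h.1 hr h.2.1

-- the two found_answers sets have the same members
theorem pvFoundIff (cids rids : List Int) (coords : List (Int × Int))
    (S : PySem.Set (Int × Int)) (hS : ∀ y, S.contains y = true ↔ y ∈ coords)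
    (Hpre : ∀ cr ∈ coords, ∀ i : Nat, i < cids.length → rids.length ≤ i →
      cids.getD i 0 - 1 ≠ cr.1)
    (x : Int × Int) :
    (x ∈ (PySem.Set.empty : PySem.Set (Int × Int)) ∨
      ∃ cr ∈ coords, (!(pvCellTokenIndexes cids rids cr.1 cr.2).isEmpty) = true ∧ cr = x) ↔
    (x ∈ (PySem.Set.empty : PySem.Set (Int × Int)) ∨
      ∃ p ∈ PySem.List.enumerate (cids.zip rids) 0,
        PySem.Set.contains S (p.2.1 - 1, p.2.2 - 1) = true ∧
        (p.2.1 - 1, p.2.2 - 1) = x) := by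
  simp only [PySem.Set.empty, List.not_mem_nil, false_or]
  constructor
  · rintro ⟨cr, hcr, hne, rfl⟩
    rw [Bool.not_eq_eq_eq_not, Bool.not_true, List.isEmpty_eq_false_iff] at hne
    obtain ⟨j, hj⟩ := List.exists_mem_of_ne_nil _ hne
    have h0 := pvIdxsNonneg _ _ _ _ _ hj
    rw [← Int.toNat_of_nonneg h0] at hj
    have hk := pvMatchLt cids rids coords Hpre cr j.toNat hcr hj
    have hm := (pvMemIdxs cids rids cr.1 cr.2 j.toNat).mp hj
    refine ⟨((j.toNat : Int), (cids.zip rids)[j.toNat]), ?_, ?_, ?_⟩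
    · exact (PySem.List.mem_enumerate_iff _ 0 _).mpr ⟨j.toNat, hk, by rw [zero_add]⟩
    · have hcell : ((cids.zip rids)[j.toNat].1 - 1, (cids.zip rids)[j.toNat].2 - 1) = cr := by
        have := pvZipGetD cids rids j.toNat hk
        rw [List.getD_eq_getElem _ _ hk] at this
        rw [this]
        cases cr
        exact Prod.ext hm.2.1 hm.2.2
      rw [hcell]
      exact (hS _).mpr hcr
    · have := pvZipGetD cids rids j.toNat hk
      rw [List.getD_eq_getElem _ _ hk] at this
      rw [this]
      cases cr
      exact Prod.ext hm.2.1 hm.2.2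
  · rintro ⟨p, hp, hcont, hcell⟩
    obtain ⟨k, hklt, rfl⟩ := (PySem.List.mem_enumerate_iff _ 0 p).mp hp
    have hxc : x ∈ coords := by
      rw [hcell] at hcont
      exact (hS _).mp hcont
    have hzs := pvZipGetD cids rids k hklt
    rw [List.getD_eq_getElem _ _ hklt] at hzs
    dsimp only at hcell
    rw [hzs] at hcell
    dsimp only at hcell
    obtain ⟨x1, x2⟩ := x
    injection hcell with hc1 hc2
    refine ⟨(x1, x2), hxc, ?_, rfl⟩
    have hkc : k < cids.length := by
      rw [List.length_zip] at hklt
      omega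
    have hmem : (k : Int) ∈ pvCellTokenIndexes cids rids x1 x2 := by
      rw [pvMemIdxs]
      exact ⟨hkc, hc1, hc2⟩
    rw [Bool.not_eq_eq_eq_not, Bool.not_true, List.isEmpty_eq_false_iff]
    exact List.ne_nil_of_mem hmem

theorem get_all_answer_ids_from_coordinates_py_spec : Claim_equal_get_all_answer_ids_from_coordinates_py := by
  intro cids rids al _ hpre
  unfold Spec_get_all_answer_ids_from_coordinates_py
  have Hpre : ∀ cr ∈ al.flatten, ∀ i : Nat, i < cids.length → rids.length ≤ i →
      cids.getD i 0 - 1 ≠ cr.1 := by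
    intro cr hcr
    rw [List.mem_flatten] at hcr
    obtain ⟨a, ha, hcra⟩ := hcr
    exact hpre a ha cr hcra
  simp only [get_all_answer_ids_from_coordinates_py, get_all_answer_ids_from_coordinates_py_alt]
  rw [← List.foldl_flatten, pvProjA, pvProjB, pvAllEq]
  have hSmem : ∀ y, (PySem.Set.update PySem.Set.empty al.flatten).contains y = true ↔
      y ∈ al.flatten := by
    intro y
    rw [PySem.Set.contains_iff, PySem.Set.mem_update]
    simp [PySem.Set.empty]
  dsimp only
  rw [Prod.mk.injEq]
  constructor
  · -- answer_ids
    rw [pvIdsB_enum]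
    apply List.ext_getElem?
    intro j
    rw [pvIdsAGet cids rids al.flatten _ j (List.length_replicate),
        pvIdsBGet (cids.zip rids) _ (cids.zip rids).length _ j le_rfl
          (by rw [List.length_replicate, List.length_zip]; omega)]
    have hcond : (∃ cr ∈ al.flatten, (j : Int) ∈ pvCellTokenIndexes cids rids cr.1 cr.2) ↔
        (j < (cids.zip rids).length ∧ PySem.Set.contains
          (PySem.Set.update PySem.Set.empty al.flatten)
          (((cids.zip rids).getD j (0, 0)).1 - 1,
           ((cids.zip rids).getD j (0, 0)).2 - 1) = true) := by
      constructor
      · rintro ⟨cr, hcr, hj⟩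
        have hk := pvMatchLt cids rids al.flatten Hpre cr j hcr hj
        have hm := (pvMemIdxs cids rids cr.1 cr.2 j).mp hj
        refine ⟨hk, ?_⟩
        rw [pvZipGetD _ _ _ hk]
        have hcell : ((cids.getD j 0, rids.getD j 0).1 - 1,
            (cids.getD j 0, rids.getD j 0).2 - 1) = cr := by
          cases cr
          exact Prod.ext hm.2.1 hm.2.2
        rw [hcell]
        exact (hSmem _).mpr hcr
      · rintro ⟨hk, hcont⟩
        rw [pvZipGetD _ _ _ hk] at hcont
        have hx := (hSmem _).mp hcont
        refine ⟨(cids.getD j 0 - 1, rids.getD j 0 - 1), hx, ?_⟩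
        rw [pvMemIdxs]
        refine ⟨by rw [List.length_zip] at hk; omega, rfl, rfl⟩
    simp only [hcond]
  · -- missing_count
    have hshape : al.flatten.foldl (fun f cr =>
          if (pvCellTokenIndexes cids rids cr.1 cr.2).isEmpty then f
          else PySem.Set.add f cr) (PySem.Set.empty : PySem.Set (Int × Int)) =
        al.flatten.foldl (fun f cr =>
          if (!(pvCellTokenIndexes cids rids cr.1 cr.2).isEmpty) then PySem.Set.add f cr
          else f) (PySem.Set.empty : PySem.Set (Int × Int)) := by
      apply PySem.List.foldl_congr_mem
      intro acc x _
      cases h : (pvCellTokenIndexes cids rids x.1 x.2).isEmpty <;> rfl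
    rw [hshape]
    have hnodA := pvNodupFoldAdd al.flatten
        (fun cr => !(pvCellTokenIndexes cids rids cr.1 cr.2).isEmpty) (fun cr => cr)
        PySem.Set.empty List.nodup_nil
    have hnodB := pvNodupFoldAdd (PySem.List.enumerate (cids.zip rids) 0)
        (fun p => PySem.Set.contains (PySem.Set.update PySem.Set.empty al.flatten) (p.2.1 - 1, p.2.2 - 1))
        (fun p => (p.2.1 - 1, p.2.2 - 1)) PySem.Set.empty List.nodup_nil
    have hmem : ∀ x, x ∈ al.flatten.foldl (fun f cr =>
          if (!(pvCellTokenIndexes cids rids cr.1 cr.2).isEmpty) then PySem.Set.add f cr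
          else f) (PySem.Set.empty : PySem.Set (Int × Int)) ↔
        x ∈ (PySem.List.enumerate (cids.zip rids) 0).foldl (fun f p =>
          if PySem.Set.contains (PySem.Set.update PySem.Set.empty al.flatten) (p.2.1 - 1, p.2.2 - 1) then
            PySem.Set.add f (p.2.1 - 1, p.2.2 - 1) else f)
          (PySem.Set.empty : PySem.Set (Int × Int)) := by
      intro x
      rw [pvMemFoldAdd al.flatten
            (fun cr => !(pvCellTokenIndexes cids rids cr.1 cr.2).isEmpty) (fun cr => cr)
            PySem.Set.empty x,
          pvMemFoldAdd (PySem.List.enumerate (cids.zip rids) 0)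
            (fun p => PySem.Set.contains (PySem.Set.update PySem.Set.empty al.flatten) (p.2.1 - 1, p.2.2 - 1))
            (fun p => (p.2.1 - 1, p.2.2 - 1)) PySem.Set.empty x]
      exact pvFoundIff cids rids al.flatten _ hSmem Hpre x
    have hlen := ((List.perm_ext_iff_of_nodup hnodA hnodB).mpr hmem).length_eq
    simp only [PySem.Set.len, hlen]
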